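-- pv_equiv track=rewrite | github.com/rootanand/ArrayQuestions | Rotation/index_right.py | Right_Index
-- ===== SOURCE A (Python) =====
-- def Right_Index(Array):
--
--     rotation=1
--
--     while not (rotation>2):
--
--         X=Array.pop(-1)
--         Array.insert(0,X)
--         rotation+=1
--
--     Value=Array[3]
--     return Value
-- ===== SOURCE B (Python) =====
-- def Right_Index(Array):
--     # Rotate right by 2 with one in-place slice assignment (same mutation as A's
--     # two pop/insert iterations), then index.
--     Array[:] = Array[-2:] + Array[:-2]
--     return Array[3]
-- ===== Notes on version B (the rewrite author's own statement) =====
-- stated objective: simpler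
-- what changed: The two pop(-1)/insert(0,..) loop iterations are replaced by a single closed-form slice rearrangement Array[:] = Array[-2:] + Array[:-2]; the same in-place mutation is kept.
import Mathlib
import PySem

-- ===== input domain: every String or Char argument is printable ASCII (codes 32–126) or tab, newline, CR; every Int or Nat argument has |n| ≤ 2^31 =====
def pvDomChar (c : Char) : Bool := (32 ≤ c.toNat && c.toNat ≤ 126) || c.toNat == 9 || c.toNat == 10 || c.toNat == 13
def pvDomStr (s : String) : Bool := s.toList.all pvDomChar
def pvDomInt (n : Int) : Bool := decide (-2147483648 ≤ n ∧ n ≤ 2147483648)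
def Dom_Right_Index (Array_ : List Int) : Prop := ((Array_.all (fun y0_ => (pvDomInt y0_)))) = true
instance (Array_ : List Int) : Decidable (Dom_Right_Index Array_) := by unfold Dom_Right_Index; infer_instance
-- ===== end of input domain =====

-- B replaces A's two pop(-1)/insert(0,..) loop iterations with a single closed-form
-- slice rearrangement Array[-2:] + Array[:-2] (same in-place mutation in Python);
-- equivalence here is about the return value.

-- ===== PORT A =====
-- the 'while not (rotation > 2)' loop: pop the last element, insert it at the front
def rotLoopA (rotation : Int) (arr : List Int) : Option (List Int) :=
  if rotation > 2 then some arr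
  else
    match PySem.List.pop? arr (-1) with
    | none => none                       -- IndexError: pop from empty list
    | some (X, rest) => rotLoopA (rotation + 1) (PySem.List.insert rest 0 X)
termination_by (3 - rotation).toNat
decreasing_by omega

def Right_Index (Array_ : List Int) : Int :=
  match rotLoopA 1 Array_ with
  | none => 0                            -- unreachable under Pre_
  | some a => (PySem.List.pyGet? a 3).getD 0   -- Array[3]; none (IndexError) excluded by Pre_

-- ===== PORT B =====
def Right_Index_alt (Array_ : List Int) : Int :=
  let r := PySem.List.slice Array_ (some (-2)) none ++ PySem.List.slice Array_ none (some (-2))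
  (PySem.List.pyGet? r 3).getD 0         -- Array[3]; none (IndexError) excluded by Pre_

-- ===== PRECONDITION & SPEC =====
-- A raises IndexError on lists of fewer than 4 elements (pop from empty, or Array[3]).
def Pre_Right_Index (Array_ : List Int) : Prop := 4 ≤ Array_.length
instance (Array_ : List Int) : Decidable (Pre_Right_Index Array_) := by unfold Pre_Right_Index; infer_instance
def pvWitness_Right_Index : List Int := [1, 2, 3, 4]

def Spec_Right_Index (Array_ : List Int) (out : Int) : Prop := out = Right_Index_alt Array_
instance (Array_ : List Int) (out : Int) : Decidable (Spec_Right_Index Array_ out) := by unfold Spec_Right_Index; infer_instance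

-- ===== CLAIM (what is proved, stated in full; the proofs are below) =====
def Claim_equal_Right_Index : Prop := ∀ (Array_ : List Int), Dom_Right_Index Array_ → Pre_Right_Index Array_ → Spec_Right_Index Array_ (Right_Index Array_)

-- ===== LEMMAS AND PROOFS =====

-- A's loop on xs ++ [y, z] (length ≥ 2) rotates right twice: result y :: z :: xs
theorem rotLoopA_eq (xs : List Int) (y z : Int) :
    rotLoopA 1 (xs ++ [y, z]) = some (y :: z :: xs) := by
  rw [rotLoopA]
  have h1 : PySem.List.pop? (xs ++ [y, z]) (-1) = some (z, xs ++ [y]) := by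
    have : xs ++ [y, z] = (xs ++ [y]) ++ [z] := by simp
    rw [this, PySem.List.pop?_last]
  simp only [h1, PySem.List.insert_zero]
  norm_num
  rw [rotLoopA]
  have h2 : PySem.List.pop? (z :: (xs ++ [y])) (-1) = some (y, z :: xs) := by
    have : z :: (xs ++ [y]) = (z :: xs) ++ [y] := by simp
    rw [this, PySem.List.pop?_last]
  simp only [h2, PySem.List.insert_zero]
  norm_num
  rw [rotLoopA]
  norm_num

theorem main_eq (Array_ : List Int) (h : 4 ≤ Array_.length) :
    Right_Index Array_ = Right_Index_alt Array_ := by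
  obtain ⟨ys, y, z, rfl⟩ : ∃ ys y z, Array_ = ys ++ [y, z] := by
    match Array_, h with
    | a :: b :: c :: d :: rest, _ =>
      rcases (a :: b :: c :: d :: rest).eq_nil_or_concat' with h0 | ⟨ys, z, hz⟩
      · simp at h0
      · rw [hz]
        rcases ys.eq_nil_or_concat' with rfl | ⟨ys', y, rfl⟩
        · exfalso; apply_fun List.length at hz; simp at hz
        · exact ⟨ys', y, z, by simp⟩
  unfold Right_Index Right_Index_alt
  rw [rotLoopA_eq]
  rw [PySem.List.slice_from_neg_ofNat _ 2 (by omega),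
      PySem.List.slice_to_neg_ofNat _ 2 (by omega)]
  have hlen : (ys ++ [y, z]).length - 2 = ys.length := by simp
  rw [hlen]
  rw [show ys ++ [y, z] = ys ++ [y, z] from rfl]
  simp [List.drop_left', List.take_left']

-- ===== VERDICT (by name: the statement is the Claim_ definition above) =====
theorem Right_Index_spec : Claim_equal_Right_Index := by
  intro Array_ _ hpre
  unfold Spec_Right_Index
  exact main_eq Array_ hpre
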